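-- pv_equiv track=rewrite | github.com/aditya-khant/sheet-id-splitter | deprecated_measure_segmentation/score_splitter.py | cleanup_bars
-- ===== SOURCE A (Python) =====
-- def cleanup_bars(bars, width):
--     """Cleans up a set of bars in staves globally"""
--     if len(bars) > 1:
--         l_diffs = []
--         for i in range(len(bars) - 1):
--             l_diffs.append(abs(bars[i][0] - bars[i+1][0]))
--         if min(l_diffs) < width:
--             lowest_index = l_diffs.index(min(l_diffs))
--             if lowest_index == 0:
--                 new_bars = [bars[0]] + bars[2:]
--             elif lowest_index == len(l_diffs) - 1:
--                 new_bars = bars[0:-2] + [bars[-1]]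
--             else:
--                 if l_diffs[lowest_index - 1] < l_diffs[lowest_index+1]:
--                     new_bars = bars[0:lowest_index] + bars[lowest_index+1:]
--                 else:
--                     new_bars = bars[0:lowest_index+1] + bars[lowest_index+2:]
--
--             return cleanup_bars(new_bars, width)
--         else:
--             return bars
--     else:
--         return bars
-- ===== SOURCE B (Python) =====
-- def cleanup_bars(bars, width):
--     """Cleans up a set of bars in staves globally"""
--     bars = list(bars)
--     while len(bars) > 1:
--         # single fused scan: minimal adjacent gap and its first index
--         best = None
--         best_idx = 0
--         for i in range(len(bars) - 1):
--             g = abs(bars[i][0] - bars[i + 1][0])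
--             if best is None or g < best:
--                 best = g
--                 best_idx = i
--         if best >= width:
--             break
--         last = len(bars) - 2
--         if best_idx == 0:
--             j = 1
--         elif best_idx == last:
--             j = last
--         else:
--             left = abs(bars[best_idx - 1][0] - bars[best_idx][0])
--             right = abs(bars[best_idx + 1][0] - bars[best_idx + 2][0])
--             j = best_idx if left < right else best_idx + 1
--         del bars[j]
--     return bars
-- ===== Notes on version B (the rewrite author's own statement) =====
-- stated objective: alternative
-- what changed: Replaces A's recursive step (build the whole adjacent-diff list, min(), .index(), rebuild the list by slicing, recurse) with an iterative while loop whose single fused scan finds the minimal gap and its first index at once and deletes one bar in place per round.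
import Mathlib
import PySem

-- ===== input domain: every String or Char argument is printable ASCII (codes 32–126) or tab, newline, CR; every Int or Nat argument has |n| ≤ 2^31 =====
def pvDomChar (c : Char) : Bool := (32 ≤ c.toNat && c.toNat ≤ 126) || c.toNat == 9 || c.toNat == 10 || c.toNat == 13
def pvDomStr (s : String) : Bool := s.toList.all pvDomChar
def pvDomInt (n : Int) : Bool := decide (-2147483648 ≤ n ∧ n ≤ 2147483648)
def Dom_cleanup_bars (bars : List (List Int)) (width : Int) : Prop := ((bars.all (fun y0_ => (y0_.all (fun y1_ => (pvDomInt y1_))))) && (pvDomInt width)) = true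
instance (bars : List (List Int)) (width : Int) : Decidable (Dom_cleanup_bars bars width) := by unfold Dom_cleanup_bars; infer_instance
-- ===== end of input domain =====

-- B replaces A's recursive step (build the whole diff list, min(), .index(), rebuild by slicing,
-- recurse) by an iterative loop whose single fused scan finds the minimal gap and its first index,
-- deleting one bar in place per round (objective: alternative; equal return value on Pre_).

-- ===== PORT A =====
-- bars[i][0]: first element of an inner list (Pre_ keeps inner lists nonempty where A indexes them)
def pvFst (l : List Int) : Int := (PySem.List.pyGet? l 0).getD 0

-- fuel-bounded transliteration of A's recursion; each recursive call removes exactly one bar,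
-- so fuel = bars.length (supplied by the wrapper below) is never exhausted.
def cleanup_barsGo : Nat → List (List Int) → Int → List (List Int)
  | 0, bars, _ => bars
  | fuel+1, bars, width =>
    if 1 < bars.length then
      let l_diffs : List Int :=
        (PySem.List.pyRange 0 (PySem.List.len bars - 1) 1).foldl
          (fun acc i =>
            acc ++ [|pvFst (PySem.List.pyGetD bars i []) - pvFst (PySem.List.pyGetD bars (i+1) [])|]) []
      let m : Int := (PySem.List.min? l_diffs (fun x => x)).getD 0
      if m < width then
        let lowest : Nat := (PySem.List.index? l_diffs m).getD 0
        let new_bars : List (List Int) :=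
          if lowest = 0 then
            [PySem.List.pyGetD bars 0 []] ++ PySem.List.slice bars (some 2) none
          else if lowest = l_diffs.length - 1 then
            PySem.List.slice bars none (some (-2)) ++ [PySem.List.pyGetD bars (-1) []]
          else
            if PySem.List.pyGetD l_diffs ((lowest : Int) - 1) 0 <
               PySem.List.pyGetD l_diffs ((lowest : Int) + 1) 0 then
              PySem.List.slice bars (some 0) (some (lowest : Int)) ++
                PySem.List.slice bars (some ((lowest : Int) + 1)) none
            else
              PySem.List.slice bars (some 0) (some ((lowest : Int) + 1)) ++
                PySem.List.slice bars (some ((lowest : Int) + 2)) none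
        cleanup_barsGo fuel new_bars width
      else bars
    else bars

def cleanup_bars (bars : List (List Int)) (width : Int) : List (List Int) :=
  cleanup_barsGo bars.length bars width

-- ===== PORT B =====
-- fuel-bounded transliteration of B's while loop (fuel = bars.length, same justification)
def cleanup_barsAltGo : Nat → List (List Int) → Int → List (List Int)
  | 0, bars, _ => bars
  | fuel+1, bars, width =>
    if 1 < bars.length then
      let scan : Option Int × Int :=
        (PySem.List.pyRange 0 (PySem.List.len bars - 1) 1).foldl
          (fun st i =>
            match st.1 with
            | none => (some (|pvFst (PySem.List.pyGetD bars i []) - pvFst (PySem.List.pyGetD bars (i+1) [])|), i)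
            | some m =>
              if |pvFst (PySem.List.pyGetD bars i []) - pvFst (PySem.List.pyGetD bars (i+1) [])| < m then
                (some (|pvFst (PySem.List.pyGetD bars i []) - pvFst (PySem.List.pyGetD bars (i+1) [])|), i)
              else st)
          (none, 0)
      if width ≤ scan.1.getD 0 then bars
      else
        let last : Int := PySem.List.len bars - 2
        let j : Int :=
          if scan.2 = 0 then 1
          else if scan.2 = last then last
          else
            if |pvFst (PySem.List.pyGetD bars (scan.2 - 1) []) - pvFst (PySem.List.pyGetD bars scan.2 [])| <
               |pvFst (PySem.List.pyGetD bars (scan.2 + 1) []) - pvFst (PySem.List.pyGetD bars (scan.2 + 2) [])| then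
              scan.2
            else scan.2 + 1
        cleanup_barsAltGo fuel (bars.eraseIdx j.toNat) width
    else bars

def cleanup_bars_alt (bars : List (List Int)) (width : Int) : List (List Int) :=
  cleanup_barsAltGo bars.length bars width

-- ===== PRECONDITION & SPEC =====
-- Pre_ excludes inputs where A raises: with more than one bar, A reads bar[0] of every bar, an
-- IndexError on an empty inner list.
def Pre_cleanup_bars (bars : List (List Int)) (width : Int) : Prop :=
  bars.length ≤ 1 ∨ ∀ b ∈ bars, b ≠ []
instance (bars : List (List Int)) (width : Int) : Decidable (Pre_cleanup_bars bars width) := by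
  unfold Pre_cleanup_bars; infer_instance

def pvWitness_cleanup_bars : List (List Int) × Int := ([[0], [5], [6]], 2)

def Spec_cleanup_bars (bars : List (List Int)) (width : Int) (out : List (List Int)) : Prop := out = cleanup_bars_alt bars width
instance (bars : List (List Int)) (width : Int) (out : List (List Int)) : Decidable (Spec_cleanup_bars bars width out) := by unfold Spec_cleanup_bars; infer_instance

-- ===== CLAIM (what is proved, stated in full; the proofs are below) =====
def Claim_equal_cleanup_bars : Prop := ∀ (bars : List (List Int)) (width : Int), Dom_cleanup_bars bars width → Pre_cleanup_bars bars width → Spec_cleanup_bars bars width (cleanup_bars bars width)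

-- ===== LEMMAS AND PROOFS =====

-- B's fused scan over range(K) computes exactly (min of the diff list, first index of that min):
-- Python's min() keeps the leftmost minimum and .index() returns the first occurrence, and the
-- scan's strict '<' update likewise keeps the earliest minimal index.
lemma pv_scan_eq (f : Int → Int) (K : Nat) :
    List.foldl
      (fun (st : Option Int × Int) i =>
        match st.1 with
        | none => (some (f i), i)
        | some m => if f i < m then (some (f i), i) else st)
      (none, 0) (PySem.List.pyRange 0 (K : Int) 1)
    = (PySem.List.min? ((PySem.List.pyRange 0 (K : Int) 1).map f) (fun x => x),
       (((PySem.List.index? ((PySem.List.pyRange 0 (K : Int) 1).map f)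
          ((PySem.List.min? ((PySem.List.pyRange 0 (K : Int) 1).map f) (fun x => x)).getD 0)).getD 0 : Nat) : Int)) := by
  induction K with
  | zero =>
    simp [PySem.List.pyRange_one_eq_nil, PySem.List.min?, PySem.List.index?]
  | succ K ih =>
    have hsp : PySem.List.pyRange 0 ((K + 1 : Nat) : Int) 1
        = PySem.List.pyRange 0 (K : Int) 1 ++ [(K : Int)] := by
      push_cast
      exact PySem.List.pyRange_one_succ_right (by positivity)
    rw [hsp, List.foldl_append, ih, List.map_append]
    simp only [List.map_cons, List.map_nil]
    set l := (PySem.List.pyRange 0 (K : Int) 1).map f with hl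
    cases hmin : PySem.List.min? l (fun x => x) with
    | none =>
      have hnil : l = [] := (PySem.List.min?_eq_none_iff l _).mp hmin
      have hK : K = 0 := by
        have := congrArg List.length hnil
        simpa [hl, PySem.List.length_pyRange_one] using this
      subst hK
      simp [hnil, PySem.List.min?, PySem.List.index?]
    | some m =>
      have hmem : m ∈ l := PySem.List.min?_mem hmin
      have hminl : ∀ y ∈ l, m ≤ y := PySem.List.min?_isMin hmin
      have hlen : l.length = K := by
        simp [hl, PySem.List.length_pyRange_one]
      have hmin' : PySem.List.min? (l ++ [f (K : Int)]) (fun x => x)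
          = if f (K : Int) < m then some (f (K : Int)) else some m := by
        simp only [PySem.List.min?, List.foldl_append] at hmin ⊢
        rw [hmin]
        simp [List.foldl]
      by_cases hlt : f (K : Int) < m
      · have hnot : f (K : Int) ∉ l := fun hmem' => absurd (hminl _ hmem') (by omega)
        rw [hmin']
        simp only [if_pos hlt, Option.getD_some]
        rw [PySem.List.index?_append_singleton_self l _ hnot]
        simp [hlt, hlen]
      · rw [hmin']
        simp only [if_neg hlt, Option.getD_some]
        rw [PySem.List.index?_append_of_mem _ hmem]
        simp [hlt]


-- dropping all but the last element leaves exactly the last element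
lemma pv_drop_pred {α : Type} (xs : List α) (h : xs ≠ []) :
    xs.drop (xs.length - 1) = [xs.getLast h] := by
  have hlt : xs.length - 1 < xs.length := by
    cases xs with | nil => exact absurd rfl h | cons a t => simp
  rw [List.drop_eq_getElem_cons hlt, show xs.length - 1 + 1 = xs.length by omega,
      List.drop_length, List.getLast_eq_getElem]

-- the two fuel-bounded loops agree on every input
lemma pv_go_eq (fuel : Nat) :
    ∀ bars width, cleanup_barsGo fuel bars width = cleanup_barsAltGo fuel bars width := by
  induction fuel with
  | zero => intro bars _; rfl
  | succ n ih =>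
    intro bars width
    by_cases hlen : 1 < bars.length
    · simp only [cleanup_barsGo, cleanup_barsAltGo, if_pos hlen]
      have hKc : PySem.List.len bars - 1 = ((bars.length - 1 : Nat) : Int) := by
        rw [PySem.List.len_eq]; omega
      rw [hKc]
      rw [PySem.List.foldl_append_singleton_eq_map
        (fun i => |pvFst (PySem.List.pyGetD bars i []) - pvFst (PySem.List.pyGetD bars (i+1) [])|)]
      rw [pv_scan_eq
        (fun i => |pvFst (PySem.List.pyGetD bars i []) - pvFst (PySem.List.pyGetD bars (i+1) [])|)]
      simp only [List.nil_append, PySem.List.len_eq]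
      set l := List.map
          (fun i => |pvFst (PySem.List.pyGetD bars i []) - pvFst (PySem.List.pyGetD bars (i+1) [])|)
          (PySem.List.pyRange 0 ((bars.length - 1 : Nat) : Int) 1) with hl
      have hK : l.length = bars.length - 1 := by
        simp [hl, PySem.List.length_pyRange_one]
      have hlne : l ≠ [] := by
        intro h; rw [h] at hK; simp at hK; omega
      obtain ⟨m, hmin⟩ : ∃ m, PySem.List.min? l (fun x => x) = some m := by
        cases h : PySem.List.min? l (fun x => x) with
        | none => exact absurd ((PySem.List.min?_eq_none_iff l _).mp h) hlne
        | some m => exact ⟨m, rfl⟩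
      rw [hmin]
      simp only [Option.getD_some]
      have hmem : m ∈ l := PySem.List.min?_mem hmin
      obtain ⟨j, hidx⟩ : ∃ j, PySem.List.index? l m = some j :=
        Option.isSome_iff_exists.mp ((PySem.List.index?_isSome_iff l m).mpr hmem)
      rw [hidx]
      simp only [Option.getD_some]
      obtain ⟨hjlt, hjget, hjfirst⟩ := PySem.List.getElem_of_index?_eq_some hidx
      by_cases hw : m < width
      · rw [if_pos hw, if_neg (show ¬ width ≤ m by omega)]
        by_cases hj0 : j = 0
        · rw [if_pos hj0, if_pos (show ((j : Nat) : Int) = 0 by omega)]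
          have hnew : [PySem.List.pyGetD bars 0 []] ++ PySem.List.slice bars (some 2) none
              = bars.eraseIdx (Int.toNat 1) := by
            match bars, hlen with
            | b0 :: b1 :: rest, _ =>
              rw [PySem.List.slice_from _ (by norm_num : (0:Int) ≤ 2)]
              simp [List.eraseIdx]
          rw [hnew]
          exact ih _ width
        · rw [if_neg hj0, if_neg (show ¬ ((j : Nat) : Int) = 0 by omega)]
          by_cases hjl : j = l.length - 1
          · rw [if_pos hjl, if_pos (show ((j : Nat) : Int) = (bars.length : Int) - 2 by omega)]
            have hbne : bars ≠ [] := by intro h; rw [h] at hlen; simp at hlen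
            have hnew : PySem.List.slice bars none (some (-2)) ++ [PySem.List.pyGetD bars (-1) []]
                = bars.eraseIdx ((bars.length : Int) - 2).toNat := by
              rw [PySem.List.slice_to_neg_ofNat bars 2 (by norm_num),
                  PySem.List.pyGetD_neg_one bars [] hbne,
                  List.eraseIdx_eq_take_drop_succ]
              have ht : ((bars.length : Int) - 2).toNat = bars.length - 2 := by omega
              rw [ht, show bars.length - 2 + 1 = bars.length - 1 by omega,
                  pv_drop_pred bars hbne]
            rw [hnew]
            exact ih _ width
          · rw [if_neg hjl, if_neg (show ¬ ((j : Nat) : Int) = (bars.length : Int) - 2 by omega)]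
            have e1 : ((j : Nat) : Int) - 1 = (((j - 1 : Nat)) : Int) := by omega
            have e2 : ((j : Nat) : Int) + 1 = (((j + 1 : Nat)) : Int) := by omega
            rw [hl, e1, e2,
                PySem.List.pyGetD_map_pyRange _ (bars.length - 1) (j - 1) 0 (by omega),
                PySem.List.pyGetD_map_pyRange _ (bars.length - 1) (j + 1) 0 (by omega)]
            have e3 : (((j - 1 : Nat)) : Int) = ((j : Nat) : Int) - 1 := by omega
            have e5 : (((j + 1 : Nat)) : Int) = ((j : Nat) : Int) + 1 := by omega
            rw [e3, e5, show ((j : Nat) : Int) - 1 + 1 = ((j : Nat) : Int) by omega,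
                show ((j : Nat) : Int) + 1 + 1 = ((j : Nat) : Int) + 2 by omega]
            have hA1 : PySem.List.slice bars (some 0) (some ((j : Nat) : Int)) ++
                  PySem.List.slice bars (some (((j : Nat) : Int) + 1)) none
                = bars.eraseIdx ((j : Nat) : Int).toNat := by
              rw [PySem.List.slice_zero_start,
                  PySem.List.slice_to _ (by omega : (0:Int) ≤ ((j : Nat) : Int)),
                  PySem.List.slice_from _ (by omega : (0:Int) ≤ ((j : Nat) : Int) + 1),
                  List.eraseIdx_eq_take_drop_succ,
                  show ((j : Nat) : Int).toNat = j from by omega,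
                  show (((j : Nat) : Int) + 1).toNat = j + 1 from by omega]
            have hA2 : PySem.List.slice bars (some 0) (some (((j : Nat) : Int) + 1)) ++
                  PySem.List.slice bars (some (((j : Nat) : Int) + 2)) none
                = bars.eraseIdx (((j : Nat) : Int) + 1).toNat := by
              rw [PySem.List.slice_zero_start,
                  PySem.List.slice_to _ (by omega : (0:Int) ≤ ((j : Nat) : Int) + 1),
                  PySem.List.slice_from _ (by omega : (0:Int) ≤ ((j : Nat) : Int) + 2),
                  List.eraseIdx_eq_take_drop_succ,
                  show (((j : Nat) : Int) + 1).toNat = j + 1 from by omega,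
                  show (((j : Nat) : Int) + 2).toNat = j + 2 from by omega]
            by_cases hc : |pvFst (PySem.List.pyGetD bars (((j : Nat) : Int) - 1) []) -
                  pvFst (PySem.List.pyGetD bars ((j : Nat) : Int) [])| <
                |pvFst (PySem.List.pyGetD bars (((j : Nat) : Int) + 1) []) -
                  pvFst (PySem.List.pyGetD bars (((j : Nat) : Int) + 2) [])|
            · rw [if_pos hc, if_pos hc, hA1]
              exact ih _ width
            · rw [if_neg hc, if_neg hc, hA2]
              exact ih _ width
      · rw [if_neg hw, if_pos (show width ≤ m by omega)]
    · simp only [cleanup_barsGo, cleanup_barsAltGo, if_neg hlen]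

-- ===== VERDICT (by name: the statement is the Claim_ definition above) =====
theorem cleanup_bars_spec : Claim_equal_cleanup_bars := by
  intro bars width _ _
  unfold Spec_cleanup_bars cleanup_bars cleanup_bars_alt
  exact pv_go_eq bars.length bars width
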